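-- pv_equiv track=rewrite | github.com/guntars-rakitko/truenas-infra | src/truenas_infra/modules/verify.py | _san_matches
-- ===== SOURCE A (Python) =====
-- def _san_matches(host: str, sans: list[str]) -> bool:
--     """RFC 6125 hostname vs SAN matching, wildcard-aware."""
--     for s in sans:
--         if s == host:
--             return True
--         if s.startswith("*.") and host.endswith(s[1:]) and "." in host:
--             # "*.w1.lv" matches "foo.w1.lv" but NOT "bar.foo.w1.lv" (RFC 6125
--             # allows only one left-most label substitution).
--             if host.count(".") == s.count("."):
--                 return True
--     return False
-- ===== SOURCE B (Python) =====
-- def _san_matches(host: str, sans: list[str]) -> bool: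
--     """RFC 6125 hostname vs SAN matching, wildcard-aware.
--
--     Instead of testing wildcard conditions per SAN entry, build the complete
--     set of strings that could match this host (itself, plus the single
--     wildcard name obtained by replacing its left-most label) and check
--     whether any SAN is in that set.
--     """
--     candidates = {host}
--     i = host.find(".")
--     if i != -1:
--         candidates.add("*." + host[i + 1:])
--     return any(s in candidates for s in sans)
-- ===== Notes on version B (the rewrite author's own statement) =====
-- stated objective: alternative
-- what changed: Instead of testing each SAN with per-entry wildcard prefix/suffix/dot-count checks, B builds from the host alone the complete candidate set {host, '*.'+host.split-after-first-dot} and checks SAN membership in it, inverting which side is enumerated.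
import Mathlib
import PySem

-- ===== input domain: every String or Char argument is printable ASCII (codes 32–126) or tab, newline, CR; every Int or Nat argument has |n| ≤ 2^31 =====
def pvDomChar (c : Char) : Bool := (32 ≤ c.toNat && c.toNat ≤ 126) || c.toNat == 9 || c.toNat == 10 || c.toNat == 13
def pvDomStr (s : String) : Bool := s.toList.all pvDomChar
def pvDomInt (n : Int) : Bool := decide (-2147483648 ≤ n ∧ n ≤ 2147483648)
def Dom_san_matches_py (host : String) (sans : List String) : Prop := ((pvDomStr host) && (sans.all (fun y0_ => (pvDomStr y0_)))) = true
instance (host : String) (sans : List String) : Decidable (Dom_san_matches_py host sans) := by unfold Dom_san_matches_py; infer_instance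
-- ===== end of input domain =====

-- B replaces A's per-SAN wildcard suffix/dot-count test by building, from the host alone,
-- the set of strings that could match it (the host and its single one-label wildcard form)
-- and checking SAN membership in that set; same results, different decomposition.

-- ===== PORT A =====
def san_matches_py (host : String) (sans : List String) : Bool :=
  match sans with
  | [] => false
  | s :: rest =>
    if s == host then true
    else if PySem.Str.startswith s "*." && PySem.Str.endswith host (PySem.Str.slice s (some 1) none)
            && PySem.Str.isIn "." host then
      if PySem.Str.count host "." == PySem.Str.count s "." then true
      else san_matches_py host rest
    else san_matches_py host rest

-- ===== PORT B =====
-- '"*." + host[i+1:]' is ported as String.ofList ('*' :: '.' :: (host[i+1:]).toList): exact Python string concatenation.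
def san_matches_py_alt (host : String) (sans : List String) : Bool :=
  let candidates : PySem.Set String := PySem.Set.ofList [host]
  let i : Int := PySem.Str.find host "."
  let candidates : PySem.Set String :=
    if i != -1 then
      candidates.add (String.ofList ('*' :: '.' :: (PySem.Str.slice host (some (i + 1)) none).toList))
    else candidates
  sans.any (fun s => candidates.contains s)

-- ===== PRECONDITION & SPEC =====
def Spec_san_matches_py (host : String) (sans : List String) (out : Bool) : Prop := out = san_matches_py_alt host sans
instance (host : String) (sans : List String) (out : Bool) : Decidable (Spec_san_matches_py host sans out) := by unfold Spec_san_matches_py; infer_instance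

-- ===== CLAIM (what is proved, stated in full; the proofs are below) =====
def Claim_equal_san_matches_py : Prop := ∀ (host : String) (sans : List String), Dom_san_matches_py host sans → Spec_san_matches_py host sans (san_matches_py host sans)

-- ===== LEMMAS AND PROOFS =====

-- Python's s.count(".") counts the '.' characters of s.
lemma count_go_dot (l : List Char) : ∀ (fuel acc : ℕ), l.length ≤ fuel →
    PySem.Chars.count.go ['.'] fuel l acc = acc + l.count '.' := by
  induction l with
  | nil => intro fuel acc _; cases fuel <;> simp [PySem.Chars.count.go]
  | cons c t ih =>
    intro fuel acc hf
    cases fuel with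
    | zero => simp at hf
    | succ f =>
      rw [PySem.Chars.count.go]
      by_cases hc : c = '.'
      · subst hc
        simp [List.isPrefixOf, ih f (acc + 1) (by simpa using hf)]
        ring
      · simp [List.isPrefixOf, hc, Ne.symm hc, ih f acc (by simpa using hf)]

lemma count_dot (l : List Char) : PySem.Chars.count l ['.'] = l.count '.' := by
  simp [PySem.Chars.count, count_go_dot l l.length 0 le_rfl]

lemma singleton_prefix_drop (c : Char) (l : List Char) (i : ℕ) :
    [c] <+: l.drop i ↔ l[i]? = some c := by
  rw [← List.head?_drop]
  cases l.drop i with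
  | nil => simp
  | cons a t => simp [List.cons_prefix_cons, eq_comm]

-- the position of the first '.' of h, when '.' ∈ h
lemma find_dot_spec (h : List Char) (hdot : '.' ∈ h) :
    h[(PySem.Chars.find h ['.']).toNat]? = some '.' ∧
      ∀ i < (PySem.Chars.find h ['.']).toNat, h[i]? ≠ some '.' := by
  have h0 : 0 ≤ PySem.Chars.find h ['.'] := by
    rw [PySem.Chars.find_nonneg_iff]
    exact (List.singleton_infix_iff _ _).mpr hdot
  obtain ⟨h1, h2⟩ := PySem.Chars.find_spec h0
  refine ⟨(singleton_prefix_drop _ _ _).mp h1, fun i hi hc => h2 i hi ?_⟩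
  exact (singleton_prefix_drop _ _ _).mpr hc

-- the heart of the equivalence: the RFC6125 suffix + dot-count test succeeds for exactly
-- one tail, namely everything after the FIRST dot of the host
lemma main_iff (h rest : List Char) (hdot : '.' ∈ h) :
    (('.' :: rest) <:+ h ∧ h.count '.' = rest.count '.' + 1) ↔
      rest = h.drop ((PySem.Chars.find h ['.']).toNat + 1) := by
  obtain ⟨hget, hmin⟩ := find_dot_spec h hdot
  set n := (PySem.Chars.find h ['.']).toNat with hn
  have hlt : n < h.length := (List.getElem?_eq_some_iff.mp hget).1
  have hgetn : h[n] = '.' := by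
    have := (List.getElem?_eq_some_iff.mp hget).2; exact this
  have hsplit : h = h.take n ++ '.' :: h.drop (n + 1) := by
    rw [← hgetn, List.getElem_cons_drop, List.take_append_drop]
  have htake : '.' ∉ h.take n := by
    intro hmem
    obtain ⟨i, hi, hieq⟩ := List.getElem_of_mem hmem
    have hi' : i < n := lt_of_lt_of_le hi (by simp)
    apply hmin i hi'
    rw [List.getElem_take] at hieq
    rw [List.getElem?_eq_some_iff]
    exact ⟨lt_of_lt_of_le hi' hlt.le, hieq⟩
  constructor
  · rintro ⟨⟨pre, hpre⟩, hcnt⟩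
    -- h = pre ++ '.' :: rest with pre dot-free, so pre is exactly h.take n
    have hcp : h.count '.' = pre.count '.' + (rest.count '.' + 1) := by
      rw [← hpre]; simp [List.count_append]
    have hprenodot : '.' ∉ pre := by
      rw [hcnt] at hcp
      have : pre.count '.' = 0 := by omega
      exact (List.count_eq_zero.mp this)
    have hlen : pre.length = n := by
      rcases lt_trichotomy pre.length n with hl | hl | hl
      · exfalso
        apply hmin pre.length hl
        rw [← hpre, List.getElem?_append_right le_rfl]
        simp
      · exact hl
      · exfalso
        apply hprenodot
        have : h[n]? = pre[n]? := by
          rw [← hpre, List.getElem?_append_left hl]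
        rw [this] at hget
        exact List.mem_of_getElem? hget
    have hd : h.drop (n + 1) = rest := by
      rw [← hpre, ← hlen]
      rw [show pre ++ '.' :: rest = (pre ++ ['.']) ++ rest by simp,
        show pre.length + 1 = (pre ++ ['.']).length by simp]
      exact List.drop_left
    exact hd.symm
  · rintro rfl
    constructor
    · exact ⟨h.take n, hsplit.symm⟩
    · conv_lhs => rw [hsplit]
      simp [List.count_append, List.count_eq_zero.mpr htake]

lemma step_bool (a b c r : Bool) :
    (if a then true else if b then (if c then true else r) else r) = ((a || (b && c)) || r) := by
  cases a <;> cases b <;> cases c <;> simp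

-- per-SAN: A's test equals membership in B's candidate set
lemma elem_eq (host s : String) :
    (s == host || ((PySem.Str.startswith s "*." && PySem.Str.endswith host (PySem.Str.slice s (some 1) none)
        && PySem.Str.isIn "." host) && (PySem.Str.count host "." == PySem.Str.count s ".")))
    = (s == host || (PySem.Str.isIn "." host
        && (s == String.ofList ('*' :: '.' :: host.toList.drop ((PySem.Chars.find host.toList ['.']).toNat + 1))))) := by
  rcases Bool.eq_false_or_eq_true (s == host) with he | he
  · rw [he]; simp only [Bool.true_or]
  rw [he]; simp only [Bool.false_or]
  rcases (Bool.eq_false_or_eq_true (PySem.Str.isIn "." host)).symm with hin | hin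
  · rw [hin]
    simp only [Bool.false_and, Bool.and_false]
  · rw [hin]
    simp only [Bool.true_and]
    have hdot : '.' ∈ host.toList := by
      have := hin
      simp only [PySem.Str.isIn_eq] at this
      rw [PySem.Chars.isIn_iff_infix] at this
      simpa using (List.singleton_infix_iff _ _).mp (by simpa using this)
    rcases (Bool.eq_false_or_eq_true (PySem.Str.startswith s "*.")).symm with hsw | hsw
    · rw [hsw]
      simp only [Bool.false_and]
      -- s does not start with "*.", so s cannot be the wildcard candidate
      symm
      rw [beq_eq_false_iff_ne]
      intro hcon
      have htrue : PySem.Str.startswith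
          (String.ofList ('*' :: '.' :: host.toList.drop ((PySem.Chars.find host.toList ['.']).toNat + 1))) "*." = true := by
        simp only [PySem.Str.startswith_eq, String.toList_ofList]
        rw [PySem.Chars.startswith_iff]
        exact ⟨_, rfl⟩
      rw [hcon, htrue] at hsw
      exact Bool.noConfusion hsw
    · rw [hsw]
      simp only [Bool.true_and]
      have hsl : ('*' :: '.' :: []) <+: s.toList := by
        have := hsw
        simp only [PySem.Str.startswith_eq] at this
        rw [PySem.Chars.startswith_iff] at this
        simpa using this
      obtain ⟨tl, htl⟩ := hsl
      simp only [List.cons_append, List.nil_append] at htl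
      -- reduce to list level
      have hslice : (PySem.Str.slice s (some 1) none).toList = '.' :: tl := by
        simp only [PySem.Str.toList_slice, PySem.Chars.slice_eq_listSlice]
        rw [PySem.List.slice_from s.toList (by norm_num : (0:ℤ) ≤ 1), ← htl]
        rfl
      rw [show PySem.Str.endswith host (PySem.Str.slice s (some 1) none)
            = PySem.Chars.endswith host.toList ('.' :: tl) by
          simp [PySem.Str.endswith_eq, hslice]]
      have hcnt : PySem.Str.count s "." = tl.count '.' + 1 := by
        simp only [PySem.Str.count_eq, show (".":String).toList = ['.'] from rfl, count_dot, ← htl]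
        simp
      have hcnth : PySem.Str.count host "." = host.toList.count '.' := by
        simp only [PySem.Str.count_eq, show (".":String).toList = ['.'] from rfl, count_dot]
      rw [hcnt, hcnth]
      have hsm : (s == String.ofList ('*' :: '.' :: host.toList.drop ((PySem.Chars.find host.toList ['.']).toNat + 1)))
          = (tl == host.toList.drop ((PySem.Chars.find host.toList ['.']).toNat + 1)) := by
        rcases (Bool.eq_false_or_eq_true (tl == host.toList.drop ((PySem.Chars.find host.toList ['.']).toNat + 1))).symm with ht | ht
        · rw [ht, beq_eq_false_iff_ne]
          intro hc
          have : s.toList = '*' :: '.' :: host.toList.drop ((PySem.Chars.find host.toList ['.']).toNat + 1) := by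
            rw [hc]; simp
          rw [← htl] at this
          simp only [List.cons.injEq, true_and] at this
          rw [beq_eq_false_iff_ne] at ht
          exact ht this
        · have htl' : tl = host.toList.drop ((PySem.Chars.find host.toList ['.']).toNat + 1) :=
            beq_iff_eq.mp ht
          have hseq : s = String.ofList ('*' :: '.' :: host.toList.drop ((PySem.Chars.find host.toList ['.']).toNat + 1)) := by
            rw [String.ext_iff, String.toList_ofList, ← htl, htl']
          rw [ht, hseq, beq_self_eq_true]
      rw [hsm]
      rcases (Bool.eq_false_or_eq_true (PySem.Chars.endswith host.toList ('.' :: tl))).symm with hew | hew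
      · rw [hew]
        simp only [Bool.false_and]
        symm; rw [beq_eq_false_iff_ne]
        intro hc
        have hsuf := ((main_iff host.toList tl hdot).mpr hc).1
        rw [(PySem.Chars.endswith_iff _ _).mpr hsuf] at hew
        exact Bool.noConfusion hew
      · rw [hew]
        simp only [Bool.true_and]
        rw [PySem.Chars.endswith_iff] at hew
        rcases (Bool.eq_false_or_eq_true (host.toList.count '.' == tl.count '.' + 1)).symm with hq | hq
        · rw [hq]
          symm; rw [beq_eq_false_iff_ne]
          intro hc
          have hcnt2 := ((main_iff host.toList tl hdot).mpr hc).2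
          rw [beq_eq_false_iff_ne] at hq
          exact hq hcnt2
        · rw [hq]
          symm
          rw [beq_iff_eq] at hq ⊢
          exact (main_iff host.toList tl hdot).mp ⟨hew, hq⟩

-- B's candidate-set membership, unfolded into a per-SAN test
def wildOf (host : String) : String :=
  String.ofList ('*' :: '.' :: host.toList.drop ((PySem.Chars.find host.toList ['.']).toNat + 1))

def acceptB (host s : String) : Bool :=
  s == host || (PySem.Str.isIn "." host && (s == wildOf host))

lemma find_bne_eq_isIn (host : String) :
    (PySem.Str.find host "." != -1) = PySem.Str.isIn "." host := by
  simp only [PySem.Str.find_eq, PySem.Str.isIn_eq]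
  rcases (Bool.eq_false_or_eq_true (PySem.Chars.isIn (".":String).toList host.toList)).symm with hi | hi
  · rw [hi]
    have h2 : PySem.Chars.find host.toList (".":String).toList = -1 := by
      rw [PySem.Chars.find_eq_neg_one_iff]
      rw [PySem.Chars.isIn_eq_false_iff] at hi
      exact hi
    rw [h2]; rfl
  · rw [hi]
    have h2 : PySem.Chars.find host.toList (".":String).toList ≠ -1 := by
      rw [PySem.Chars.find_ne_neg_one_iff]
      rw [PySem.Chars.isIn_iff_infix] at hi
      exact hi
    simp only [bne_iff_ne]
    exact h2

lemma alt_any (host : String) (sans : List String) :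
    san_matches_py_alt host sans = sans.any (acceptB host) := by
  show (sans.any fun s =>
      (if (PySem.Str.find host "." != -1) = true then
        (PySem.Set.ofList [host]).add
          (String.ofList ('*' :: '.' :: (PySem.Str.slice host (some (PySem.Str.find host "." + 1))).toList))
      else PySem.Set.ofList [host]).contains s) = _
  rw [find_bne_eq_isIn]
  have hof : PySem.Set.ofList [host] = [host] := by
    simp [PySem.Set.ofList, PySem.Set.add, PySem.Set.empty, PySem.Set.contains]
  rw [hof]
  rcases (Bool.eq_false_or_eq_true (PySem.Str.isIn "." host)).symm with hi | hi
  · rw [hi]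
    rw [if_neg Bool.false_ne_true]
    have hi' : PySem.Chars.isIn ['.'] host.toList = false := by rw [← hi]; rfl
    refine congrArg (List.any sans) (funext fun s => ?_)
    simp [PySem.Set.contains, acceptB, hi', ← Bool.beq_eq_decide_eq]
  · rw [hi]
    rw [if_pos rfl]
    have hi' : PySem.Chars.isIn ['.'] host.toList = true := by rw [← hi]; rfl
    have hge : 0 ≤ PySem.Str.find host "." := by
      simp only [PySem.Str.find_eq]
      rw [PySem.Chars.find_nonneg_iff]
      have := hi; simp only [PySem.Str.isIn_eq] at this
      rwa [PySem.Chars.isIn_iff_infix] at this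
    have hsl : (PySem.Str.slice host (some (PySem.Str.find host "." + 1)) none).toList
        = host.toList.drop ((PySem.Chars.find host.toList ['.']).toNat + 1) := by
      simp only [PySem.Str.toList_slice, PySem.Chars.slice_eq_listSlice]
      rw [PySem.List.slice_from host.toList (by omega : (0:ℤ) ≤ PySem.Str.find host "." + 1)]
      congr 1
      simp only [PySem.Str.find_eq] at hge ⊢
      have : (".":String).toList = ['.'] := rfl
      rw [this] at hge ⊢
      omega
    rw [show String.ofList ('*' :: '.' :: (PySem.Str.slice host (some (PySem.Str.find host "." + 1)) none).toList)
          = wildOf host by rw [hsl]; rfl]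
    by_cases hw : wildOf host = host
    · rw [show PySem.Set.add [host] (wildOf host) = [host] by
        simp [PySem.Set.add, PySem.Set.contains, hw]]
      refine congrArg (List.any sans) (funext fun s => ?_)
      simp [PySem.Set.contains, acceptB, hi', hw, ← Bool.beq_eq_decide_eq]
    · rw [show PySem.Set.add [host] (wildOf host) = [host, wildOf host] by
        simp [PySem.Set.add, PySem.Set.contains, hw]]
      refine congrArg (List.any sans) (funext fun s => ?_)
      simp [PySem.Set.contains, acceptB, hi', ← Bool.beq_eq_decide_eq]

lemma a_any (host : String) (sans : List String) :
    san_matches_py host sans = sans.any (acceptB host) := by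
  induction sans with
  | nil => rfl
  | cons s rest ih =>
    show (if s == host then true
      else if PySem.Str.startswith s "*." && PySem.Str.endswith host (PySem.Str.slice s (some 1) none)
              && PySem.Str.isIn "." host then
        if PySem.Str.count host "." == PySem.Str.count s "." then true
        else san_matches_py host rest
      else san_matches_py host rest) = _
    rw [step_bool, ih, List.any_cons]
    congr 1
    rw [elem_eq]
    rfl

-- ===== VERDICT (by name: the statement is the Claim_ definition above) =====
theorem san_matches_py_spec : Claim_equal_san_matches_py := by
  intro host sans _
  unfold Spec_san_matches_py
  rw [a_any, alt_any]
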